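-- pv_equiv track=rewrite | github.com/thieulong/INTEK | Python Basics/python_basics.py | char_to_int
-- ===== SOURCE A (Python) =====
-- import string
--
-- def char_to_int(s):
--     lst = [(d, ord(d)) for d in string.digits]
--     if isinstance(s, str) is not True:
--         raise TypeError('Not a string')
--     if len(s) != 1:
--         raise ValueError('Not a single digit')
--     for elem in lst:
--         for i in s:
--             if elem[0] == i:
--                 if elem[1] == 48: return 0
--                 if elem[1] == 49: return 1
--                 if elem[1] == 50: return 2
--                 if elem[1] == 51: return 3
--                 if elem[1] == 52: return 4
--                 if elem[1] == 53: return 5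
--                 if elem[1] == 54: return 6
--                 if elem[1] == 55: return 7
--                 if elem[1] == 56: return 8
--                 if elem[1] == 57: return 9
-- ===== SOURCE B (Python) =====
-- import string
--
-- def char_to_int(s):
--     if not isinstance(s, str):
--         raise TypeError('Not a string')
--     if len(s) != 1:
--         raise ValueError('Not a single digit')
--     if s in '0123456789':
--         return int(s)
-- ===== Notes on version B (the rewrite author's own statement) =====
-- stated objective: simpler
-- what changed: Replaced the precomputed (digit, ord) pair list with its nested loops and ten-way ord comparison chain by a direct membership test in the ASCII digit literal followed by int(s).
import Mathlib
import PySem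

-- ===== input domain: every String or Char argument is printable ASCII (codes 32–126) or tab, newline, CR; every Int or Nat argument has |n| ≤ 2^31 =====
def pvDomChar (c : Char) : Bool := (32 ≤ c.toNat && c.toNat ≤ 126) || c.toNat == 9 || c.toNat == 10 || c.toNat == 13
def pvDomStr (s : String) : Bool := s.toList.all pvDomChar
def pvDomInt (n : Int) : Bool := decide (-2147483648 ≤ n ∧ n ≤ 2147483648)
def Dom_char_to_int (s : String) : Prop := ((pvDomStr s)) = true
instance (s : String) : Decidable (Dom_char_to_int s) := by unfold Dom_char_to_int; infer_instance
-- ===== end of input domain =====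

-- B replaces A's (digit, ord) pair list with nested loops and a ten-way ord chain by a
-- membership test in the ASCII digit literal followed by int(s) (simpler).

-- ===== PORT A =====
-- lst = [(d, ord(d)) for d in string.digits]
def pvLst : List (Char × Int) := "0123456789".toList.map (fun d => (d, (d.toNat : Int)))

-- the ten-way if-chain on elem[1]; falls through (none) if no branch fires
def pvChain (n : Int) : Option Int :=
  if n = 48 then some 0 else
  if n = 49 then some 1 else
  if n = 50 then some 2 else
  if n = 51 then some 3 else
  if n = 52 then some 4 else
  if n = 53 then some 5 else
  if n = 54 then some 6 else
  if n = 55 then some 7 else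
  if n = 56 then some 8 else
  if n = 57 then some 9 else none

-- inner loop: for i in s
def pvInner (elem : Char × Int) : List Char → Option Int
  | [] => none
  | i :: rest =>
    if elem.1 = i then
      match pvChain elem.2 with
      | some v => some v
      | none => pvInner elem rest
    else pvInner elem rest

-- outer loop: for elem in lst
def pvOuter : List (Char × Int) → List Char → Option Int
  | [], _ => none
  | e :: rest, cs =>
    match pvInner e cs with
    | some v => some v
    | none => pvOuter rest cs

-- raises (TypeError impossible under the type convention; ValueError when len(s) ≠ 1) are excluded by Pre_
def pvA (cs : List Char) : Option Int :=
  if cs.length ≠ 1 then none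
  else pvOuter pvLst cs

def char_to_int (s : String) : Option Int := pvA s.toList

-- ===== PORT B =====
def pvB (cs : List Char) : Option Int :=
  if cs.length ≠ 1 then none
  else if PySem.Chars.isIn cs "0123456789".toList then PySem.Int.ofChars? cs
  else none

def char_to_int_alt (s : String) : Option Int := pvB s.toList

-- ===== PRECONDITION & SPEC =====
def Pre_char_to_int (s : String) : Prop := s.toList.length = 1
-- A raises ValueError ("Not a single digit") on any other input, e.g. on "" or "42";
-- the TypeError guard is unreachable here (s is a String under the type convention)
instance (s : String) : Decidable (Pre_char_to_int s) := by unfold Pre_char_to_int; infer_instance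
def pvWitness_char_to_int : String := String.ofList ['0']

def Spec_char_to_int (s : String) (out : Option Int) : Prop := out = char_to_int_alt s
instance (s : String) (out : Option Int) : Decidable (Spec_char_to_int s out) := by unfold Spec_char_to_int; infer_instance

-- ===== CLAIM (what is proved, stated in full; the proofs are below) =====
def Claim_equal_char_to_int : Prop := ∀ (s : String), Dom_char_to_int s → Pre_char_to_int s → Spec_char_to_int s (char_to_int s)

-- ===== LEMMAS AND PROOFS =====

-- on a single character both sides agree (checked for each digit and the non-digit case)
theorem pv_single (c : Char) : pvA [c] = pvB [c] := by
  by_cases h0 : c = '0'; · subst h0; decide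
  by_cases h1 : c = '1'; · subst h1; decide
  by_cases h2 : c = '2'; · subst h2; decide
  by_cases h3 : c = '3'; · subst h3; decide
  by_cases h4 : c = '4'; · subst h4; decide
  by_cases h5 : c = '5'; · subst h5; decide
  by_cases h6 : c = '6'; · subst h6; decide
  by_cases h7 : c = '7'; · subst h7; decide
  by_cases h8 : c = '8'; · subst h8; decide
  by_cases h9 : c = '9'; · subst h9; decide
  -- non-digit: A's chain never matches c, B's membership test is false
  have hmem : PySem.Chars.isIn [c] ['0','1','2','3','4','5','6','7','8','9'] = false := by
    rw [Bool.eq_false_iff]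
    intro hIn
    have hc : c ∈ ['0','1','2','3','4','5','6','7','8','9'] :=
      ((PySem.Chars.isIn_iff_infix _ _).mp hIn).subset (List.mem_singleton.mpr rfl)
    simp only [List.mem_cons, List.not_mem_nil, or_false] at hc
    rcases hc with h | h | h | h | h | h | h | h | h | h <;>
      first | exact h0 h | exact h1 h | exact h2 h | exact h3 h | exact h4 h
            | exact h5 h | exact h6 h | exact h7 h | exact h8 h | exact h9 h
  simp [pvA, pvB, pvLst, pvOuter, pvInner, hmem,
        Ne.symm h0, Ne.symm h1, Ne.symm h2, Ne.symm h3, Ne.symm h4,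
        Ne.symm h5, Ne.symm h6, Ne.symm h7, Ne.symm h8, Ne.symm h9]

-- ===== VERDICT (by name: the statement is the Claim_ definition above) =====
theorem char_to_int_spec : Claim_equal_char_to_int := by
  intro s _ hpre
  unfold Spec_char_to_int
  unfold Pre_char_to_int at hpre
  obtain ⟨c, hc⟩ := List.length_eq_one_iff.mp hpre
  simp only [char_to_int, char_to_int_alt, hc]
  exact pv_single c
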